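-- pv_equiv track=rewrite | github.com/AlexeyD9312/hillel0508 | lessons 11/Homework11.2.py | generate_cube_numbers
-- ===== SOURCE A (Python) =====
-- def generate_cube_numbers(end):
--     n = 2
--     while True:
--         cub = n * n * n
--         if cub > end:
--             break
--         yield cub
--         n += 1
--     return
-- ===== SOURCE B (Python) =====
-- def generate_cube_numbers(end):
--     # Find the largest base m with m**3 <= end by exponential growth + binary
--     # search (O(log end)), then emit the cubes of 2..m directly.
--     if end >= 8:
--         hi = 2
--         while hi * hi * hi <= end:
--             hi *= 2
--         lo = 2  # invariant: lo**3 <= end < hi**3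
--         while lo + 1 < hi:
--             mid = (lo + hi) // 2
--             if mid * mid * mid <= end:
--                 lo = mid
--             else:
--                 hi = mid
--         yield from (n * n * n for n in range(2, lo + 1))
-- ===== Notes on version B (the rewrite author's own statement) =====
-- stated objective: alternative
-- what changed: B replaces A's linear scan (increment the base, cube, test, yield) by an exponential-growth plus binary search that finds the largest base m with m*m*m <= end, then emits the cubes of the bases from 2 to m with a single range comprehension.
import Mathlib
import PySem

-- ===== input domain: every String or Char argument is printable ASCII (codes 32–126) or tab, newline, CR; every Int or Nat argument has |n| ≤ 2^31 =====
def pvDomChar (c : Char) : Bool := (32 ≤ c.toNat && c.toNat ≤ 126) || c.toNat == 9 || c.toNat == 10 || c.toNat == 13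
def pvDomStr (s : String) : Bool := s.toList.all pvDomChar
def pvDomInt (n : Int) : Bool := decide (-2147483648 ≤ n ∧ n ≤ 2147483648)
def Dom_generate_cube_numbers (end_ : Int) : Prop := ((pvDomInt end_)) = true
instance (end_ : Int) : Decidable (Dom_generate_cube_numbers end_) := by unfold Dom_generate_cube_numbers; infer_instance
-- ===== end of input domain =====

-- B replaces A's linear scan with an exponential-growth plus binary search for
-- the largest base m whose cube is at most end, then maps cubing over a range.


-- ===== PORT A =====
-- A's while-loop: n starts at 2, yields n*n*n while it is ≤ end_, else breaks.
-- The proof argument 2 ≤ n only justifies termination (n ≤ n³ ≤ end_).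
def pvGoA (end_ : Int) (n : Int) (h : 2 ≤ n) : List Int :=
  if hgt : n * n * n > end_ then []
  else (n * n * n) :: pvGoA end_ (n + 1) (by omega)
termination_by (end_ + 1 - n).toNat
decreasing_by
  have hle : n ≤ n * n * n := by nlinarith
  omega

def generate_cube_numbers (end_ : Int) : List Int := pvGoA end_ 2 (by omega)

-- ===== PORT B =====
-- `while hi * hi * hi <= end: hi *= 2` from Source B (proof arg is for termination only)
def pvGrowHi (end_ : Int) (hi : Int) (h : 2 ≤ hi) : Int :=
  if hi * hi * hi ≤ end_ then pvGrowHi end_ (hi * 2) (by omega) else hi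
termination_by (end_ + 1 - hi).toNat
decreasing_by
  have hle : hi ≤ hi * hi * hi := by nlinarith
  omega

-- `while lo + 1 < hi: mid = (lo + hi) // 2; …` from Source B
def pvBsearch (end_ : Int) (lo : Int) (hi : Int) : Int :=
  if hlt : lo + 1 < hi then
    let mid := PySem.Int.floordiv (lo + hi) 2
    if mid * mid * mid ≤ end_ then pvBsearch end_ mid hi else pvBsearch end_ lo mid
  else lo
termination_by (hi - lo).toNat
decreasing_by
  all_goals
    rw [PySem.Int.floordiv_eq_ediv_of_pos (by omega)] at *
    omega

def generate_cube_numbers_alt (end_ : Int) : List Int :=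
  if 8 ≤ end_ then
    let hi := pvGrowHi end_ 2 (by omega)
    let lo := pvBsearch end_ 2 hi
    (PySem.List.pyRange 2 (lo + 1) 1).map (fun n => n * n * n)
  else []

-- ===== PRECONDITION & SPEC =====
def Spec_generate_cube_numbers (end_ : Int) (out : List Int) : Prop := out = generate_cube_numbers_alt end_
instance (end_ : Int) (out : List Int) : Decidable (Spec_generate_cube_numbers end_ out) := by unfold Spec_generate_cube_numbers; infer_instance

-- ===== CLAIM (what is proved, stated in full; the proofs are below) =====
def Claim_equal_generate_cube_numbers : Prop := ∀ (end_ : Int), Dom_generate_cube_numbers end_ → Spec_generate_cube_numbers end_ (generate_cube_numbers end_)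

-- ===== LEMMAS AND PROOFS =====

-- cube is monotone from 2 on
theorem pv_cube_le_cube {a b : Int} (ha : 2 ≤ a) (hab : a ≤ b) :
    a * a * a ≤ b * b * b := by
  have h0 : (0:Int) ≤ a := by omega
  gcongr <;> nlinarith

-- growHi returns a bound whose cube exceeds end_, never shrinking, and strictly
-- growing when the loop body runs at least once
theorem pvGrowHi_spec (end_ : Int) : ∀ (hi : Int) (h : 2 ≤ hi),
    hi ≤ pvGrowHi end_ hi h ∧ end_ < pvGrowHi end_ hi h * pvGrowHi end_ hi h * pvGrowHi end_ hi h ∧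
      (hi * hi * hi ≤ end_ → hi < pvGrowHi end_ hi h) := by
  intro hi h
  induction hi, h using pvGrowHi.induct end_ with
  | case1 hi h hle ih =>
    rw [pvGrowHi, if_pos hle]
    exact ⟨by omega, ih.2.1, fun _ => by omega⟩
  | case2 hi h hgt =>
    rw [pvGrowHi, if_neg hgt]
    exact ⟨le_refl _, by omega, fun hc => absurd hc hgt⟩

-- binary search keeps lo³ ≤ end_ < hi³ and ends with hi = lo + 1
theorem pvBsearch_spec (end_ : Int) : ∀ (lo hi : Int), 2 ≤ lo → lo < hi →
    lo * lo * lo ≤ end_ → end_ < hi * hi * hi →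
    2 ≤ pvBsearch end_ lo hi ∧
      pvBsearch end_ lo hi * pvBsearch end_ lo hi * pvBsearch end_ lo hi ≤ end_ ∧
      end_ < (pvBsearch end_ lo hi + 1) * (pvBsearch end_ lo hi + 1) * (pvBsearch end_ lo hi + 1) := by
  intro lo hi
  induction lo, hi using pvBsearch.induct end_ with
  | case1 lo hi hlt mid hcube ih =>
    intro h2 _ hlo3 hhi3
    rw [pvBsearch, dif_pos hlt, if_pos hcube]
    have hmid : lo < mid ∧ mid < hi := by
      have := PySem.Int.floordiv_eq_ediv_of_pos (a := lo + hi) (b := 2) (by omega)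
      simp only [mid, this]
      omega
    exact ih (by omega) (by omega) hcube hhi3
  | case2 lo hi hlt mid hcube ih =>
    intro h2 _ hlo3 hhi3
    rw [pvBsearch, dif_pos hlt, if_neg hcube]
    have hmid : lo < mid ∧ mid < hi := by
      have := PySem.Int.floordiv_eq_ediv_of_pos (a := lo + hi) (b := 2) (by omega)
      simp only [mid, this]
      omega
    exact ih h2 (by omega) hlo3 (by omega)
  | case3 lo hi hge =>
    intro h2 hlt hlo3 hhi3
    rw [pvBsearch, dif_neg hge]
    have : hi = lo + 1 := by omega
    subst this
    exact ⟨h2, hlo3, hhi3⟩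

-- A's loop from n enumerates exactly the cubes of n..m when m³ ≤ end_ < (m+1)³
theorem pvGoA_eq_range (end_ m : Int) (hm2 : 2 ≤ m)
    (hm : m * m * m ≤ end_) (hm1 : end_ < (m + 1) * (m + 1) * (m + 1)) :
    ∀ (n : Int) (h : 2 ≤ n),
      pvGoA end_ n h = (PySem.List.pyRange n (m + 1) 1).map (fun k => k * k * k) := by
  intro n h
  induction n, h using pvGoA.induct end_ with
  | case1 n h hgt =>
    rw [pvGoA, dif_pos hgt]
    have hnm : m + 1 ≤ n := by
      by_contra hc
      push Not at hc
      have : n * n * n ≤ m * m * m := pv_cube_le_cube h (by omega)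
      omega
    rw [PySem.List.pyRange_one_eq_nil (by omega)]
    rfl
  | case2 n h hle ih =>
    rw [pvGoA, dif_neg hle]
    push Not at hle
    have hnm : n ≤ m := by
      by_contra hc
      push Not at hc
      have : (m + 1) * (m + 1) * (m + 1) ≤ n * n * n := pv_cube_le_cube (by omega) (by omega)
      omega
    rw [PySem.List.pyRange_one_cons (by omega), List.map_cons, ih]

-- ===== VERDICT (by name: the statement is the Claim_ definition above) =====
theorem generate_cube_numbers_spec : Claim_equal_generate_cube_numbers := by
  unfold Claim_equal_generate_cube_numbers Spec_generate_cube_numbers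
  intro end_ _
  unfold generate_cube_numbers generate_cube_numbers_alt
  by_cases h8 : 8 ≤ end_
  · rw [if_pos h8]
    have hgrow := pvGrowHi_spec end_ 2 (by omega)
    set hi := pvGrowHi end_ 2 (by omega) with hhi
    have hhi2 : 2 < hi := hgrow.2.2 (by omega)
    have hb := pvBsearch_spec end_ 2 hi (by omega) (by omega) (by omega) hgrow.2.1
    set m := pvBsearch end_ 2 hi with hm
    exact pvGoA_eq_range end_ m hb.1 hb.2.1 hb.2.2 2 (by omega)
  · rw [if_neg h8, pvGoA, dif_pos (by omega)]
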